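-- pv_equiv track=rewrite | github.com/rikulauttia/data-structures-algorithms | week_04/roboroute.py | analyze_route
-- ===== SOURCE A (Python) =====
-- def analyze_route(grid):
--     grid = [list(row) for row in grid]
--
--     # Etsitään robotin alkuruutu
--     robot_y, robot_x = None, None
--     for y in range(len(grid)):
--         for x in range(len(grid[y])):
--             if grid[y][x] == 'R':
--                 robot_y, robot_x = y, x
--                 # Merkataan alkuruutu lattiaksi, koska robotti lähtee liikkeelle siitä
--                 grid[y][x] = '.'
--                 break
--         if robot_y is not None:
--             break
--
--     directions = [(-1, 0), (0, 1), (1, 0), (0, -1)]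
--     current_dir = 0
--
--     visited = set()
--     visited.add((robot_y, robot_x))
--
--     state_history = set()
--
--     height = len(grid)
--     width = len(grid[0])
--
--     while True:
--         next_y = robot_y + directions[current_dir][0]
--         next_x = robot_x + directions[current_dir][1]
--
--         # Tarkistetaan, olemmeko ruudukon ulkopuolella
--         if next_y < 0 or next_y >= height or next_x < 0 or next_x >= width:
--             return (len(visited), True)
--
--         # Tarkistetaan, onko edessä este
--         if grid[next_y][next_x] == '#':
--             # Käännytään oikealle
--             current_dir = (current_dir + 1) % 4 # % 4 varmistaa, että suunta pysyy välillä 0-3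
--         else:
--             # Liikutaan eteenpäin
--             robot_y, robot_x = next_y, next_x
--             visited.add((robot_y, robot_x))
--
--         # Tarkistetaan nykyinen tila (koordinaatit + suunta)
--         current_state = (robot_y, robot_x, current_dir)
--         if current_state in state_history:
--             return (len(visited), False)
--
--         state_history.add(current_state)
-- ===== SOURCE B (Python) =====
-- def analyze_route(grid):
--     rows = [list(r) for r in grid]
--     ry, rx = -1, -1
--     for y, row in enumerate(rows):
--         if 'R' in row:
--             ry, rx = y, row.index('R')
--             row[rx] = '.'
--             break
--     h, w = len(rows), len(rows[0])
--     dirs = ((-1, 0), (0, 1), (1, 0), (0, -1))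
--     d = 0
--     visited = {(ry, rx)}
--     # Pigeonhole: a walk that never leaves the grid must repeat one of the
--     # at most 4*h*w (position, direction) states, after which no new cell is
--     # ever visited; so 4*h*w + 1 iterations decide the loop case exactly.
--     for _ in range(4 * h * w + 1):
--         ny, nx = ry + dirs[d][0], rx + dirs[d][1]
--         if not (0 <= ny < h and 0 <= nx < w):
--             return (len(visited), True)
--         if rows[ny][nx] == '#':
--             d = (d + 1) % 4
--         else:
--             ry, rx = ny, nx
--             visited.add((ry, rx))
--     return (len(visited), False)
-- ===== Notes on version B (the rewrite author's own statement) =====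
-- stated objective: simpler
-- what changed: B drops A's per-state history set and instead runs the same move/turn simulation for a fixed pigeonhole bound of 4*h*w+1 iterations, returning (len(visited), False) when the bound is exhausted, which is exact because a non-exiting walk repeats a (y,x,dir) state within that bound and adds no new cells afterwards.
-- outside the precondition, e.g. on analyze_route(['..', '#', 'R.']): A returns (2, True), B returns (2, True)
import Mathlib
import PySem

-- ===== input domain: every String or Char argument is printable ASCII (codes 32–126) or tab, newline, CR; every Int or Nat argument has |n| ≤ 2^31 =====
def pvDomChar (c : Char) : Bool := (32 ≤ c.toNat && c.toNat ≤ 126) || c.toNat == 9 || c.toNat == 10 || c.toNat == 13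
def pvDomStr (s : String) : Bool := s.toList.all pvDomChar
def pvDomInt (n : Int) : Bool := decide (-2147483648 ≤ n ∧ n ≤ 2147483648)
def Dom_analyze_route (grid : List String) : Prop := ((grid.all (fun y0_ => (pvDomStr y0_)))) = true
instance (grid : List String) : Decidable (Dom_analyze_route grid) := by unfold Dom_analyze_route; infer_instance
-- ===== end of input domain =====

-- B replaces A's per-state history set by a fixed pigeonhole bound of 4*h*w+1 simulation steps (simpler loop state);
-- equivalence is about the return value (Python A only mutates its own copy of the grid).

-- ===== PORT A =====
def arDirs : List (Int × Int) := [(-1, 0), (0, 1), (1, 0), (0, -1)]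

-- inner "for x in range(len(grid[y]))" scan for 'R'
def arFindRow : List Char → Nat → Option Nat
  | [], _ => none
  | c :: t, x => if c = 'R' then some x else arFindRow t (x + 1)

-- outer "for y" scan with break
def arFind : List (List Char) → Nat → Option (Nat × Nat)
  | [], _ => none
  | r :: rs, y =>
    match arFindRow r 0 with
    | some x => some (y, x)
    | none => arFind rs (y + 1)

-- the "while True" loop of A; the fuel argument only makes it total (proved unreachable inside Pre_)
def arLoop (rows : List (List Char)) (h w : Int) :
    Nat → Int → Int → Int → PySem.Set (Int × Int) → PySem.Set (Int × Int × Int) → Int × Bool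
  | 0, _, _, _, visited, _ => (PySem.Set.len visited, false)
  | fuel + 1, y, x, d, visited, hist =>
    let dd := PySem.List.pyGetD arDirs d ((0 : Int), (0 : Int))
    let ny := y + dd.1
    let nx := x + dd.2
    if ny < 0 ∨ h ≤ ny ∨ nx < 0 ∨ w ≤ nx then (PySem.Set.len visited, true)
    else
      let s :=
        if PySem.List.pyGetD (PySem.List.pyGetD rows ny []) nx ' ' = '#' then
          (y, x, PySem.Int.mod (d + 1) 4, visited)
        else
          (ny, nx, d, PySem.Set.add visited (ny, nx))
      let st := (s.1, s.2.1, s.2.2.1)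
      if PySem.Set.contains hist st then (PySem.Set.len s.2.2.2, false)
      else arLoop rows h w fuel s.1 s.2.1 s.2.2.1 s.2.2.2 (PySem.Set.add hist st)

def analyze_route (grid : List String) : Int × Bool :=
  let rows0 := grid.map (fun s => s.toList)
  match arFind rows0 0 with
  | none => (0, false)  -- Python A raises TypeError here (no 'R'); excluded by Pre_
  | some (ry, rx) =>
    let rows := rows0.set ry ((rows0.getD ry []).set rx '.')
    arLoop rows (rows.length : Int) ((rows.headD []).length : Int)
      (4 * rows.length * (rows.headD []).length + 2)
      (ry : Int) (rx : Int) 0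
      (PySem.Set.add PySem.Set.empty ((ry : Int), (rx : Int))) PySem.Set.empty

-- ===== PORT B =====
def brDirs : List (Int × Int) := [(-1, 0), (0, 1), (1, 0), (0, -1)]

-- "if 'R' in row: rx = row.index('R')" over the rows
def brFind (rows : List (List Char)) : Option (Nat × Nat) :=
  match rows.findIdx? (fun r => r.contains 'R') with
  | none => none
  | some y =>
    match PySem.List.index? (rows.getD y []) 'R' with
    | some x => some (y, x)
    | none => none

-- "for _ in range(4*h*w+1)" bounded simulation, no history set
def brLoop (rows : List (List Char)) (h w : Int) :
    Nat → Int → Int → Int → PySem.Set (Int × Int) → Int × Bool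
  | 0, _, _, _, visited => (PySem.Set.len visited, false)
  | n + 1, y, x, d, visited =>
    let ny := y + (PySem.List.pyGetD brDirs d ((0 : Int), (0 : Int))).1
    let nx := x + (PySem.List.pyGetD brDirs d ((0 : Int), (0 : Int))).2
    if ¬ (0 ≤ ny ∧ ny < h ∧ 0 ≤ nx ∧ nx < w) then (PySem.Set.len visited, true)
    else if PySem.List.pyGetD (PySem.List.pyGetD rows ny []) nx ' ' = '#' then
      brLoop rows h w n y x (PySem.Int.mod (d + 1) 4) visited
    else
      brLoop rows h w n ny nx d (PySem.Set.add visited (ny, nx))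

def analyze_route_alt (grid : List String) : Int × Bool :=
  let rows0 := grid.map (fun s => s.toList)
  match brFind rows0 with
  | some (y0, x0) =>
    let rows := rows0.set y0 ((rows0.getD y0 []).set x0 '.')
    brLoop rows (rows.length : Int) ((rows.headD []).length : Int)
      (4 * rows.length * (rows.headD []).length + 1)
      (y0 : Int) (x0 : Int) 0 (PySem.Set.ofList [((y0 : Int), (x0 : Int))])
  | none =>  -- no robot: B keeps (-1, -1) and the grid unchanged
    brLoop rows0 (rows0.length : Int) ((rows0.headD []).length : Int)
      (4 * rows0.length * (rows0.headD []).length + 1)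
      (-1) (-1) 0 (PySem.Set.ofList [(-1, -1)])

-- ===== PRECONDITION & SPEC =====
-- Pre_ excludes grids without 'R' (A raises TypeError) and those ragged grids whose shape does not
-- rule out A indexing a missing cell of a short row (IndexError); the kept shapes — no row shorter
-- than the first, or the robot at/right of the first row's width, or a clear in-range column above
-- the robot — cannot crash, and some ragged grids A happens to return on are excluded with the rest.
def Pre_analyze_route (grid : List String) : Prop :=
  (∃ r ∈ grid, 'R' ∈ r.toList) ∧
  (let w := (grid.headD "").toList.length
   let y := grid.findIdx (fun s => decide ('R' ∈ s.toList))
   let x := ((grid.getD y "").toList).idxOf 'R'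
   (∀ r ∈ grid, w ≤ r.toList.length) ∨
   w ≤ x ∨
   (x < w ∧ ∀ i ∈ List.range y,
     x < ((grid.getD i "").toList).length ∧ ((grid.getD i "").toList).getD x ' ' ≠ '#'))

instance (grid : List String) : Decidable (Pre_analyze_route grid) := by
  unfold Pre_analyze_route; infer_instance

def pvWitness_analyze_route : List String := ["R.", ".#"]

def Spec_analyze_route (grid : List String) (out : Int × Bool) : Prop := out = analyze_route_alt grid
instance (grid : List String) (out : Int × Bool) : Decidable (Spec_analyze_route grid out) := by
  unfold Spec_analyze_route; infer_instance

-- ===== CLAIM (what is proved, stated in full; the proofs are below) =====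
def Claim_equal_analyze_route : Prop :=
  ∀ (grid : List String), Dom_analyze_route grid → Pre_analyze_route grid →
    Spec_analyze_route grid (analyze_route grid)

-- ===== LEMMAS AND PROOFS =====

-- the common one-iteration step of both simulations (proof-side abstraction)
def pvStep (rows : List (List Char)) (h w : Int) (s : Int × Int × Int) : Option (Int × Int × Int) :=
  let dd := PySem.List.pyGetD arDirs s.2.2 ((0 : Int), (0 : Int))
  let ny := s.1 + dd.1
  let nx := s.2.1 + dd.2
  if ny < 0 ∨ h ≤ ny ∨ nx < 0 ∨ w ≤ nx then none
  else if PySem.List.pyGetD (PySem.List.pyGetD rows ny []) nx ' ' = '#' then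
    some (s.1, s.2.1, PySem.Int.mod (s.2.2 + 1) 4)
  else some (ny, nx, s.2.2)

def pvInBox (h w : Int) (s : Int × Int × Int) : Prop :=
  0 ≤ s.1 ∧ s.1 < h ∧ 0 ≤ s.2.1 ∧ s.2.1 < w ∧ 0 ≤ s.2.2 ∧ s.2.2 < 4

theorem brLoop_succ (rows : List (List Char)) (h w : Int) (n : Nat) (y x d : Int)
    (v : PySem.Set (Int × Int)) (hmem : (y, x) ∈ v) :
    brLoop rows h w (n + 1) y x d v =
      match pvStep rows h w (y, x, d) with
      | none => (PySem.Set.len v, true)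
      | some s' => brLoop rows h w n s'.1 s'.2.1 s'.2.2 (PySem.Set.add v (s'.1, s'.2.1)) := by
  have hd : brDirs = arDirs := rfl
  rcases hstep : pvStep rows h w (y, x, d) with _ | ⟨a, b, c⟩ <;>
    rw [pvStep] at hstep <;> simp only at hstep <;> rw [brLoop, hd] <;>
    split_ifs at hstep with h1 h2
  · -- step none: out of bounds
    have h3 : ¬ (0 ≤ y + (PySem.List.pyGetD arDirs d (0, 0)).1 ∧
        y + (PySem.List.pyGetD arDirs d (0, 0)).1 < h ∧
        0 ≤ x + (PySem.List.pyGetD arDirs d (0, 0)).2 ∧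
        x + (PySem.List.pyGetD arDirs d (0, 0)).2 < w) := by omega
    simp [h3]
  · -- turn
    obtain ⟨rfl, rfl, rfl⟩ : y = a ∧ x = b ∧ PySem.Int.mod (d + 1) 4 = c := by
      simpa using hstep
    have h3 : (0 ≤ y + (PySem.List.pyGetD arDirs d (0, 0)).1 ∧
        y + (PySem.List.pyGetD arDirs d (0, 0)).1 < h ∧
        0 ≤ x + (PySem.List.pyGetD arDirs d (0, 0)).2 ∧
        x + (PySem.List.pyGetD arDirs d (0, 0)).2 < w) := by omega
    simp [h3, h2, PySem.Set.add_of_mem hmem]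
  · -- move
    obtain ⟨rfl, rfl, rfl⟩ : y + (PySem.List.pyGetD arDirs d (0, 0)).1 = a ∧
        x + (PySem.List.pyGetD arDirs d (0, 0)).2 = b ∧ d = c := by simpa using hstep
    have h3 : (0 ≤ y + (PySem.List.pyGetD arDirs d (0, 0)).1 ∧
        y + (PySem.List.pyGetD arDirs d (0, 0)).1 < h ∧
        0 ≤ x + (PySem.List.pyGetD arDirs d (0, 0)).2 ∧
        x + (PySem.List.pyGetD arDirs d (0, 0)).2 < w) := by omega
    simp [h3, h2]

theorem arLoop_succ (rows : List (List Char)) (h w : Int) (m : Nat) (y x d : Int)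
    (v : PySem.Set (Int × Int)) (hist : PySem.Set (Int × Int × Int)) (hmem : (y, x) ∈ v)
    (hI1 : ∀ u, pvStep rows h w (y, x, d) = some u → u ∈ hist → (u.1, u.2.1) ∈ v) :
    arLoop rows h w (m + 1) y x d v hist =
      match pvStep rows h w (y, x, d) with
      | none => (PySem.Set.len v, true)
      | some s' =>
        if s' ∈ hist then (PySem.Set.len v, false)
        else arLoop rows h w m s'.1 s'.2.1 s'.2.2 (PySem.Set.add v (s'.1, s'.2.1))
               (PySem.Set.add hist s') := by
  rcases hstep : pvStep rows h w (y, x, d) with _ | ⟨a, b, c⟩ <;>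
    have hstep2 := hstep <;>
    rw [pvStep] at hstep2 <;> simp only at hstep2 <;> rw [arLoop] <;>
    split_ifs at hstep2 with h1 h2
  · simp [h1]
  · -- turn
    obtain ⟨rfl, rfl, rfl⟩ : y = a ∧ x = b ∧ PySem.Int.mod (d + 1) 4 = c := by
      simpa using hstep2
    simp [h1, h2]
    split_ifs with hf
    · rfl
    · rw [PySem.Set.add_of_mem hmem]
  · -- move
    obtain ⟨rfl, rfl, rfl⟩ : y + (PySem.List.pyGetD arDirs d (0, 0)).1 = a ∧
        x + (PySem.List.pyGetD arDirs d (0, 0)).2 = b ∧ d = c := by simpa using hstep2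
    simp [h1, h2]
    split_ifs with hf
    · have hpv := hI1 _ hstep hf
      simp only at hpv
      rw [PySem.Set.add_of_mem hpv]
    · rfl

theorem pvStep_box (rows : List (List Char)) (h w : Int) (s s' : Int × Int × Int)
    (hs : pvInBox h w s) (hstep : pvStep rows h w s = some s') : pvInBox h w s' := by
  obtain ⟨sy, sx, sd⟩ := s
  rw [pvStep] at hstep
  simp only at hstep
  split_ifs at hstep with h1 h2
  · obtain rfl : (sy, sx, PySem.Int.mod (sd + 1) 4) = s' := by simpa using hstep
    have h5 := PySem.Int.mod_nonneg (sd + 1) (show (0:Int) < 4 by norm_num)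
    have h6 := PySem.Int.mod_lt (sd + 1) (show (0:Int) < 4 by norm_num)
    simp only [pvInBox] at hs ⊢
    omega
  · obtain rfl : (sy + (PySem.List.pyGetD arDirs sd (0, 0)).1,
        sx + (PySem.List.pyGetD arDirs sd (0, 0)).2, sd) = s' := by simpa using hstep
    simp only [pvInBox] at hs ⊢
    omega

theorem pvPigeon (H W : Nat) (l : List (Int × Int × Int)) (hnd : l.Nodup)
    (hbox : ∀ t ∈ l, pvInBox (H : Int) (W : Int) t) : l.length ≤ 4 * H * W := by
  classical
  set f : Int × Int × Int → Nat := fun t => (t.2.2 + 4 * t.2.1 + 4 * (W : Int) * t.1).toNat with hf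
  have hlt : ∀ t ∈ l, f t < 4 * H * W := by
    intro t ht
    obtain ⟨a1, a2, a3, a4, a5, a6⟩ := hbox t ht
    have hwpos : (0 : Int) < W := lt_of_le_of_lt a3 a4
    have hmul : 4 * (W : Int) * t.1 ≤ 4 * (W : Int) * ((H : Int) - 1) := by
      apply mul_le_mul_of_nonneg_left (by omega) (by positivity)
    have he : t.2.2 + 4 * t.2.1 + 4 * (W : Int) * t.1 < 4 * (W : Int) * (H : Int) := by
      nlinarith
    have hp : (0:Int) ≤ 4 * (W : Int) * t.1 := by positivity
    have hc2 : ((4 * H * W : Nat) : Int) = 4 * (W : Int) * (H : Int) := by push_cast; ring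
    simp only [hf]
    omega
  have hinj : ∀ t ∈ l, ∀ t' ∈ l, f t = f t' → t = t' := by
    intro t ht t' ht' hft
    obtain ⟨a1, a2, a3, a4, a5, a6⟩ := hbox t ht
    obtain ⟨b1, b2, b3, b4, b5, b6⟩ := hbox t' ht'
    have he : t.2.2 + 4 * t.2.1 + 4 * (W : Int) * t.1
        = t'.2.2 + 4 * t'.2.1 + 4 * (W : Int) * t'.1 := by
      have h1 : (0:Int) ≤ t.2.2 + 4 * t.2.1 + 4 * (W : Int) * t.1 := by
        have : (0:Int) ≤ 4 * (W : Int) * t.1 := by positivity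
        omega
      have h2 : (0:Int) ≤ t'.2.2 + 4 * t'.2.1 + 4 * (W : Int) * t'.1 := by
        have : (0:Int) ≤ 4 * (W : Int) * t'.1 := by positivity
        omega
      simp only [hf] at hft
      omega
    -- peel off: first the direction, then the column, then the row
    have hyy : t.1 = t'.1 := by
      rcases lt_trichotomy t.1 t'.1 with hlt' | heq | hgt
      · have : 4 * (W : Int) * t.1 + 4 * (W : Int) ≤ 4 * (W : Int) * t'.1 := by
          have := mul_le_mul_of_nonneg_left (show t.1 + 1 ≤ t'.1 by omega)
            (show (0:Int) ≤ 4 * (W : Int) by positivity)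
          nlinarith
        omega
      · exact heq
      · have : 4 * (W : Int) * t'.1 + 4 * (W : Int) ≤ 4 * (W : Int) * t.1 := by
          have := mul_le_mul_of_nonneg_left (show t'.1 + 1 ≤ t.1 by omega)
            (show (0:Int) ≤ 4 * (W : Int) by positivity)
          nlinarith
        omega
    have he2 : t.2.2 + 4 * t.2.1 = t'.2.2 + 4 * t'.2.1 := by rw [hyy] at he; omega
    have hxx : t.2.1 = t'.2.1 := by omega
    have hdd : t.2.2 = t'.2.2 := by omega
    exact Prod.ext hyy (Prod.ext hxx hdd)
  have hndm : (l.map f).Nodup := List.Nodup.map_on hinj hnd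
  have hsub : (l.map f).toFinset ⊆ Finset.range (4 * H * W) := by
    intro a ha
    rw [List.mem_toFinset, List.mem_map] at ha
    obtain ⟨t, ht, rfl⟩ := ha
    exact Finset.mem_range.2 (hlt t ht)
  calc l.length = (l.map f).length := (List.length_map _).symm
    _ = (l.map f).toFinset.card := (List.toFinset_card_of_nodup hndm).symm
    _ ≤ (Finset.range (4 * H * W)).card := Finset.card_le_card hsub
    _ = 4 * H * W := Finset.card_range _

theorem pvCycle (rows : List (List Char)) (h w : Int) (C : List (Int × Int × Int))
    (v : PySem.Set (Int × Int))
    (hcl : ∀ t ∈ C, ∃ u, pvStep rows h w t = some u ∧ u ∈ C)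
    (hv : ∀ t ∈ C, (t.1, t.2.1) ∈ v) :
    ∀ (n : Nat), ∀ t ∈ C, brLoop rows h w n t.1 t.2.1 t.2.2 v = (PySem.Set.len v, false) := by
  intro n
  induction n with
  | zero => intro t _; rw [brLoop]
  | succ k ih =>
    intro t ht
    obtain ⟨ty, tx, td⟩ := t
    obtain ⟨u, hu, huC⟩ := hcl _ ht
    have hmem := hv _ ht
    simp only at hmem
    rw [brLoop_succ rows h w k ty tx td v hmem, hu]
    have hpu := hv _ huC
    simpa [PySem.Set.add_of_mem hpu] using ih _ huC

theorem pvMain (rows : List (List Char)) (H W : Nat) :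
    ∀ (n : Nat) (y x d : Int) (v : PySem.Set (Int × Int)) (hist : PySem.Set (Int × Int × Int)),
    n + hist.length = 4 * H * W + 1 →
    pvInBox (H : Int) (W : Int) (y, x, d) →
    (y, x) ∈ v →
    hist.Nodup →
    (∀ t ∈ hist, pvInBox (H : Int) (W : Int) t) →
    (∀ t ∈ hist, (t.1, t.2.1) ∈ v) →
    (∀ t ∈ hist, t ≠ (y, x, d) → ∃ u, pvStep rows (H : Int) (W : Int) t = some u ∧ u ∈ hist) →
    arLoop rows (H : Int) (W : Int) (n + 1) y x d v hist = brLoop rows (H : Int) (W : Int) n y x d v := by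
  intro n
  induction n with
  | zero =>
    intro y x d v hist hfuel _ _ hnd hhb _ _
    have := pvPigeon H W hist hnd hhb
    omega
  | succ k ih =>
    intro y x d v hist hfuel hbox hmem hnd hhb hI1 hI2
    have hstepI1 : ∀ u, pvStep rows (H : Int) (W : Int) (y, x, d) = some u → u ∈ hist →
        (u.1, u.2.1) ∈ v := fun u _ hu => hI1 u hu
    rw [arLoop_succ rows (H : Int) (W : Int) (k + 1) y x d v hist hmem hstepI1,
      brLoop_succ rows (H : Int) (W : Int) k y x d v hmem]
    rcases hstep : pvStep rows (H : Int) (W : Int) (y, x, d) with _ | s'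
    · rfl
    · simp only
      by_cases hs' : s' ∈ hist
      · rw [if_pos hs']
        have hpv := hI1 _ hs'
        rw [PySem.Set.add_of_mem hpv]
        have hcl : ∀ t ∈ hist, ∃ u, pvStep rows (H : Int) (W : Int) t = some u ∧ u ∈ hist := by
          intro t htl
          by_cases hts : t = (y, x, d)
          · exact hts ▸ ⟨s', hstep, hs'⟩
          · exact hI2 t htl hts
        exact (pvCycle rows (H : Int) (W : Int) hist v hcl hI1 k s' hs').symm
      · rw [if_neg hs']
        have hlen : (PySem.Set.add hist s').length = hist.length + 1 := by
          rw [PySem.Set.add_of_not_mem hs', List.length_append, List.length_cons, List.length_nil]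
        apply ih
        · omega
        · obtain ⟨a, b, c⟩ := s'
          exact pvStep_box rows _ _ _ _ hbox hstep
        · exact (PySem.Set.mem_add _ _ _).2 (Or.inr rfl)
        · exact PySem.Set.nodup_add _ _ hnd
        · intro t ht
          rcases (PySem.Set.mem_add _ _ _).1 ht with htl | rfl
          · exact hhb t htl
          · exact pvStep_box rows _ _ _ _ hbox hstep
        · intro t ht
          rcases (PySem.Set.mem_add _ _ _).1 ht with htl | rfl
          · exact (PySem.Set.mem_add _ _ _).2 (Or.inl (hI1 t htl))
          · exact (PySem.Set.mem_add _ _ _).2 (Or.inr rfl)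
        · intro t ht htne
          rcases (PySem.Set.mem_add _ _ _).1 ht with htl | rfl
          · by_cases hts : t = (y, x, d)
            · exact hts ▸ ⟨s', hstep, (PySem.Set.mem_add _ _ _).2 (Or.inr rfl)⟩
            · obtain ⟨u, hu, huh⟩ := hI2 t htl hts
              exact ⟨u, hu, (PySem.Set.mem_add _ _ _).2 (Or.inl huh)⟩
          · exact absurd rfl htne

theorem arFindRow_eq (r : List Char) : ∀ k : Nat,
    arFindRow r k = (List.idxOf? 'R' r).map (· + k) := by
  induction r with
  | nil => intro k; rfl
  | cons c t ihr =>
    intro k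
    rw [arFindRow, List.idxOf?_cons]
    by_cases hc : c = 'R'
    · simp [hc]
    · have : (c == 'R') = false := by simpa using hc
      simp only [this, if_neg hc, Bool.false_eq_true, if_false, ihr (k + 1),
        Option.map_map]
      rcases List.idxOf? 'R' t with _ | i
      · rfl
      · simp; omega

theorem brFind_cons_pos (r : List Char) (rs : List (List Char))
    (hcont : r.contains 'R' = true) :
    brFind (r :: rs) = (List.idxOf? 'R' r).map (fun x => (0, x)) := by
  rw [brFind, List.findIdx?_cons]
  simp only [hcont, if_pos]
  rcases h : List.idxOf? 'R' r with _ | x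
  · have : 'R' ∈ r := by simpa using hcont
    rw [← List.isSome_idxOf?] at this
    rw [h] at this
    simp at this
  · simp [PySem.List.index?, h]

theorem brFind_cons_neg (r : List Char) (rs : List (List Char))
    (hcont : r.contains 'R' = false) :
    brFind (r :: rs) = (brFind rs).map (fun p => (p.1 + 1, p.2)) := by
  rw [brFind, brFind, List.findIdx?_cons]
  simp only [hcont, Bool.false_eq_true, if_false]
  cases h : List.findIdx? (fun r => r.contains 'R') rs with
  | none => simp
  | some y =>
    simp only [Option.map_some, List.getD_cons_succ]
    cases PySem.List.index? (rs.getD y []) 'R' <;> rfl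

theorem pvFind_shift (rows : List (List Char)) : ∀ k : Nat,
    arFind rows k = (brFind rows).map (fun p => (p.1 + k, p.2)) := by
  induction rows with
  | nil => intro k; rfl
  | cons r rs ihr =>
    intro k
    rw [arFind, arFindRow_eq]
    by_cases hr : 'R' ∈ r
    · have hcont : r.contains 'R' = true := by simpa using hr
      rw [brFind_cons_pos r rs hcont]
      rcases h : List.idxOf? 'R' r with _ | x
      · rw [← List.isSome_idxOf?] at hr; rw [h] at hr; simp at hr
      · simp
    · have hcont : r.contains 'R' = false := by simpa using hr
      have hnone : List.idxOf? 'R' r = none := by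
        rw [← Option.not_isSome_iff_eq_none, List.isSome_idxOf?]; simpa using hr
      rw [brFind_cons_neg r rs hcont, hnone]
      simp only [Option.map_none, ihr (k + 1), Option.map_map]
      rcases brFind rs with _ | p
      · rfl
      · simp; omega

theorem pvFind_eq (rows : List (List Char)) : arFind rows 0 = brFind rows := by
  rw [pvFind_shift rows 0]
  rcases brFind rows with _ | p <;> simp


-- finding facts: a successful findIdx? hits a row satisfying the predicate
theorem pvFindIdx_getD (l : List (List Char)) (p : List Char → Bool) (y : Nat)
    (h : List.findIdx? p l = some y) : p (l.getD y []) = true := by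
  obtain ⟨h1, hfi⟩ := List.findIdx?_eq_some_iff_findIdx_eq.mp h
  subst hfi
  have h3 := List.findIdx_getElem (w := h1) (p := p) (xs := l)
  rwa [List.getD_eq_getElem l [] h1]

-- ===== VERDICT (by name: the statement is the Claim_ definition above) =====
theorem analyze_route_spec : Claim_equal_analyze_route := by
  intro grid _ hpre
  unfold Spec_analyze_route
  obtain ⟨⟨r0, hr0, hR0⟩, _⟩ := hpre
  have hany : (grid.map (fun s => s.toList)).any (fun r => r.contains 'R') = true := by
    rw [List.any_eq_true]
    exact ⟨r0.toList, List.mem_map_of_mem hr0, by simpa using hR0⟩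
  obtain ⟨y, hy⟩ : ∃ y, (grid.map (fun s => s.toList)).findIdx? (fun r => r.contains 'R') = some y := by
    rw [← Option.isSome_iff_exists, List.findIdx?_isSome]
    exact hany
  have hyl : y < (grid.map (fun s => s.toList)).length :=
    (List.findIdx?_eq_some_iff_findIdx_eq.mp hy).1
  have hmemR : 'R' ∈ (grid.map (fun s => s.toList)).getD y [] := by
    simpa using pvFindIdx_getD _ _ y hy
  obtain ⟨x, hx⟩ : ∃ x, List.idxOf? 'R' ((grid.map (fun s => s.toList)).getD y []) = some x := by
    rw [← Option.isSome_iff_exists, List.isSome_idxOf?]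
    exact hmemR
  have hix : PySem.List.index? ((grid.map (fun s => s.toList)).getD y []) 'R' = some x := hx
  have hbr : brFind (grid.map (fun s => s.toList)) = some (y, x) := by
    rw [brFind]
    simp only [hy, hix]
  have har : arFind (grid.map (fun s => s.toList)) 0 = some (y, x) := by
    rw [pvFind_eq, hbr]
  rw [analyze_route, analyze_route_alt]
  simp only [har, hbr]
  have hv : PySem.Set.ofList [((y : Int), (x : Int))]
      = PySem.Set.add PySem.Set.empty ((y : Int), (x : Int)) := rfl
  rw [hv]
  set L := (grid.map (fun s => s.toList)).set y
      (((grid.map (fun s => s.toList)).getD y []).set x '.') with hL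
  have hLlen : L.length = (grid.map (fun s => s.toList)).length := List.length_set ..
  set W := (L.headD []).length with hW
  have hmem0 : ((y : Int), (x : Int)) ∈ PySem.Set.add PySem.Set.empty ((y : Int), (x : Int)) :=
    (PySem.Set.mem_add _ _ _).2 (Or.inr rfl)
  by_cases hxW : x < W
  · -- the robot starts inside the h×w box: run the simulation argument
    have := pvMain L L.length W (4 * L.length * W + 1) (y : Int) (x : Int) 0
      (PySem.Set.add PySem.Set.empty ((y : Int), (x : Int))) PySem.Set.empty
      (by simp [PySem.Set.empty])
      (by
        simp only [pvInBox]
        refine ⟨by positivity, ?_, by positivity, ?_, by norm_num, by norm_num⟩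
        · exact_mod_cast hLlen ▸ hyl
        · exact_mod_cast hxW)
      hmem0 List.nodup_nil
      (by intro t ht; simp [PySem.Set.empty] at ht)
      (by intro t ht; simp [PySem.Set.empty] at ht)
      (by intro t ht; simp [PySem.Set.empty] at ht)
    exact this
  · -- the robot was found beyond the width of the first row: both exit at once
    have hstep : pvStep L (L.length : Int) (W : Int) ((y : Int), (x : Int), 0) = none := by
      rw [pvStep]
      simp only
      rw [show PySem.List.pyGetD arDirs (0 : Int) ((0 : Int), (0 : Int))
        = ((-1 : Int), (0 : Int)) from rfl]
      rw [if_pos]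
      right; right; right
      have : (W : Int) ≤ (x : Int) := by exact_mod_cast Nat.le_of_not_lt hxW
      simpa using this
    have hI1triv : ∀ u, pvStep L (L.length : Int) (W : Int) ((y : Int), (x : Int), 0) = some u →
        u ∈ (PySem.Set.empty : PySem.Set (Int × Int × Int)) →
        (u.1, u.2.1) ∈ PySem.Set.add PySem.Set.empty ((y : Int), (x : Int)) := by
      intro u hu
      rw [hstep] at hu
      cases hu
    rw [show 4 * L.length * W + 2 = (4 * L.length * W + 1) + 1 from rfl,
      arLoop_succ L (L.length : Int) (W : Int) (4 * L.length * W + 1) (y : Int) (x : Int) 0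
        _ _ hmem0 hI1triv,
      show 4 * L.length * W + 1 = (4 * L.length * W) + 1 from rfl,
      brLoop_succ L (L.length : Int) (W : Int) (4 * L.length * W) (y : Int) (x : Int) 0
        _ hmem0, hstep]
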